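-- pv_equiv track=rewrite | github.com/viadark/algorithm_practice | MJCodejam2017_2/p3_graphconnection/p3_graphconnect.py | sumVal
-- ===== SOURCE A (Python) =====
-- def sumVal(arry, left, right):
--     total = 0
--     total += arry[0] - left
--     maxval = arry[len(arry)-1]
--     for i in range(0, len(arry) - 1):
--         total += arry[i+1] - arry[i]
--         if maxval < arry[i]:
--             maxval = arry[i]
--     total += right - arry[len(arry)-1]
--     return [total, maxval]
-- ===== SOURCE B (Python) =====
-- def sumVal(arry, left, right):
--     return [right - left, max(arry)]
-- ===== Notes on version B (the rewrite author's own statement) =====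
-- stated objective: simpler
-- what changed: Replaces the consecutive-gap accumulation loop (which telescopes) and the hand-rolled running max with the closed form right - left and the max() builtin.
import Mathlib
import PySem

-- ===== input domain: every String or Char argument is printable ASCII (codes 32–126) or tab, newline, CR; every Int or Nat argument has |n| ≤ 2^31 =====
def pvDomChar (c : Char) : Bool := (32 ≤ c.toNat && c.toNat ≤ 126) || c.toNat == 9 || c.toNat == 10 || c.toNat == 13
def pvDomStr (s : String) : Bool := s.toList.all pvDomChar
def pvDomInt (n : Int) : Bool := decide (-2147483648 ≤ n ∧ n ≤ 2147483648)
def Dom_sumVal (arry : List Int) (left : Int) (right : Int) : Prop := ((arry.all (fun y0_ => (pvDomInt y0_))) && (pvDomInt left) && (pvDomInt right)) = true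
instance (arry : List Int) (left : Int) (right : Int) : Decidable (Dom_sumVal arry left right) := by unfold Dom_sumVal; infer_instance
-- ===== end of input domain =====

-- B replaces the telescoping gap-sum loop and running max with the closed form
-- right - left and the max() builtin (objective: simpler).

-- ===== PORT A =====
-- literal transliteration of A: accumulate arry[0]-left, then the consecutive
-- gaps arry[i+1]-arry[i] while tracking a running max, then right-arry[-1].
def sumVal (arry : List Int) (left : Int) (right : Int) : List Int :=
  let total : Int := 0
  let total := total + (PySem.List.pyGetD arry 0 0 - left)
  let maxval := PySem.List.pyGetD arry ((arry.length : Int) - 1) 0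
  let st := (PySem.List.pyRange 0 ((arry.length : Int) - 1) 1).foldl
    (fun (st : Int × Int) i =>
      let t := st.1 + (PySem.List.pyGetD arry (i + 1) 0 - PySem.List.pyGetD arry i 0)
      let m := if st.2 < PySem.List.pyGetD arry i 0 then PySem.List.pyGetD arry i 0 else st.2
      (t, m)) (total, maxval)
  let total := st.1 + (right - PySem.List.pyGetD arry ((arry.length : Int) - 1) 0)
  [total, st.2]

-- ===== PORT B =====
def sumVal_alt (arry : List Int) (left : Int) (right : Int) : List Int :=
  match PySem.List.max? arry (fun y => y) with
  | none => []          -- max([]) raises ValueError in Python; outside Pre_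
  | some m => [right - left, m]

-- ===== PRECONDITION & SPEC =====
-- A indexes arry[0], so it raises IndexError on the empty list: excluded.
def Pre_sumVal (arry : List Int) (left : Int) (right : Int) : Prop := arry ≠ []
instance (arry : List Int) (left : Int) (right : Int) : Decidable (Pre_sumVal arry left right) := by unfold Pre_sumVal; infer_instance
def pvWitness_sumVal : List Int × Int × Int := ([3, 1, 7], 0, 10)

def Spec_sumVal (arry : List Int) (left : Int) (right : Int) (out : List Int) : Prop := out = sumVal_alt arry left right
instance (arry : List Int) (left : Int) (right : Int) (out : List Int) : Decidable (Spec_sumVal arry left right out) := by unfold Spec_sumVal; infer_instance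

-- ===== CLAIM (what is proved, stated in full; the proofs are below) =====
def Claim_equal_sumVal : Prop := ∀ (arry : List Int) (left : Int) (right : Int), Dom_sumVal arry left right → Pre_sumVal arry left right → Spec_sumVal arry left right (sumVal arry left right)

-- ===== LEMMAS AND PROOFS =====

-- splitting the paired fold into its two independent components
theorem pv_foldl_prod_split (g : Int → Int) :
    ∀ (L : List Int) (t m : Int),
      L.foldl
        (fun (st : Int × Int) i =>
          (st.1 + (g (i + 1) - g i), if st.2 < g i then g i else st.2)) (t, m)
      = (L.foldl (fun t i => t + (g (i + 1) - g i)) t,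
         L.foldl (fun m i => if m < g i then g i else m) m) := by
  intro L
  induction L with
  | nil => intro t m; rfl
  | cons c L ih => intro t m; simpa using ih _ _

-- the gap sum telescopes
theorem pv_tele (g : Int → Int) :
    ∀ (k : Nat) (t0 : Int),
      ((List.range k).map Int.ofNat).foldl
        (fun t i => t + (g (i + 1) - g i)) t0 = t0 + (g k - g 0) := by
  intro k
  induction k with
  | zero => intro t0; simp
  | succ k ih =>
    intro t0
    rw [List.range_succ, List.map_append, List.foldl_append, ih]
    simp only [List.map_cons, List.map_nil, List.foldl_cons, List.foldl_nil,
      Int.ofNat_eq_natCast]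
    push_cast
    ring

theorem pv_if_eq_max (a b : Int) : (if a < b then b else a) = max a b := by
  rw [max_def]; split_ifs <;> omega

theorem pv_foldl_max_pull :
    ∀ (l : List Int) (a b : Int),
      List.foldl max (max a b) l = max a (List.foldl max b l) := by
  intro l
  induction l with
  | nil => intro a b; rfl
  | cons c l ih =>
    intro a b
    simp only [List.foldl_cons]
    rw [max_assoc, ih]

theorem pv_range_map_getD (l : List Int) (d : Int) (k : Nat) (hk : k ≤ l.length) :
    (List.range k).map (fun i => l.getD i d) = l.take k := by
  apply List.ext_getElem
  · simp [hk]
  · intro i h1 h2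
    simp only [List.getElem_map, List.getElem_range, List.getElem_take]
    exact List.getD_eq_getElem l d (by simp at h2; omega)

-- the running max over dropLast seeded with the last element equals
-- foldl max over the tail seeded with the head
theorem pv_max_rotate (x : Int) (t : List Int) :
    List.foldl max (List.getLast (x :: t) (by simp)) (List.dropLast (x :: t))
      = List.foldl max x t := by
  cases t with
  | nil => rfl
  | cons y t' =>
    have hne : (y :: t') ≠ [] := by simp
    have hd : List.dropLast (x :: y :: t') = x :: List.dropLast (y :: t') := rfl
    have hL : List.getLast (x :: y :: t') (by simp) = List.getLast (y :: t') hne := by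
      simp [List.getLast_cons]
    have hsplit : y :: t' = List.dropLast (y :: t') ++ [List.getLast (y :: t') hne] :=
      (List.dropLast_append_getLast hne).symm
    rw [hd, hL, List.foldl_cons]
    conv_rhs => rw [hsplit]
    rw [List.foldl_append]
    rw [pv_foldl_max_pull]
    simp only [List.foldl_cons, List.foldl_nil]
    rw [max_comm]

-- ===== VERDICT (by name: the statement is the Claim_ definition above) =====
theorem sumVal_spec : Claim_equal_sumVal := by
  intro arry left right _ hpre
  unfold Spec_sumVal
  obtain ⟨x, t, rfl⟩ := List.exists_cons_of_ne_nil hpre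
  unfold sumVal sumVal_alt
  rw [PySem.List.max?_id_cons]
  set g : Int → Int := fun i => PySem.List.pyGetD (x :: t) i 0 with hg
  have hlen : ((List.length (x :: t) : Int) - 1) = (t.length : Int) := by
    simp
  have hrange : PySem.List.pyRange 0 ((List.length (x :: t) : Int) - 1) 1
      = (List.range t.length).map Int.ofNat := by
    rw [hlen, PySem.List.pyRange_one]
    simp only [sub_zero, Int.toNat_natCast]
    exact List.map_congr_left (fun a _ => by simp)
  simp only [hrange]
  rw [pv_foldl_prod_split g]
  rw [pv_tele g]
  -- max component: turn the if-fold into a foldl max over dropLast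
  have hifmax : (fun (m i : Int) => if m < g i then g i else m)
      = fun (m i : Int) => max m (g i) := by
    funext m i; exact pv_if_eq_max m (g i)
  rw [hifmax]
  have hstep : ((List.range t.length).map Int.ofNat).foldl
      (fun m i => max m (g i)) (g ((List.length (x :: t) : Int) - 1))
      = List.foldl max (g ((List.length (x :: t) : Int) - 1))
          ((List.range t.length).map (fun k => (x :: t).getD k 0)) := by
    rw [List.foldl_map, List.foldl_map]
    have hfun : (fun (m : Int) (k : Nat) => max m (g (Int.ofNat k)))
        = fun (m : Int) (k : Nat) => max m ((x :: t).getD k 0) := by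
      funext m k
      simp [hg, PySem.List.pyGetD_natCast]
    rw [hfun]
  rw [hstep]
  have htake : (List.range t.length).map (fun k => (x :: t).getD k 0)
      = (x :: t).dropLast := by
    rw [pv_range_map_getD _ _ _ (by simp)]
    rw [List.dropLast_eq_take]
    simp
  have hlast : g ((List.length (x :: t) : Int) - 1) = List.getLast (x :: t) (by simp) := by
    rw [hg, hlen]
    simp only [PySem.List.pyGetD_natCast]
    rw [List.getD_eq_getElem _ _ (by simp), List.getLast_eq_getElem]
    rfl
  rw [htake, hlast, pv_max_rotate]
  -- the total telescopes: the boundary values cancel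
  have e0 : PySem.List.pyGetD (x :: t) 0 0 = x := by
    simp [PySem.List.pyGetD_zero_cons]
  have eN : g (t.length : Int)
      = PySem.List.pyGetD (x :: t) ((List.length (x :: t) : Int) - 1) 0 := by
    rw [hg]; simp only; rw [hlen]
  have e00 : g 0 = x := by rw [hg]; simp only; exact e0
  simp only [List.cons.injEq, and_true, e0, eN, e00]
  ring
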